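-- pv_equiv track=rewrite | github.com/li871804050/kaggle | hacker/test_21.py | claen
-- ===== SOURCE A (Python) =====
-- def claen(s):
--     i = 0
--     while i < len(s) - 1:
--         if s[i] == 'm' and s[i + 1] == 'i':
--             s = s[: i] + s[i + 2:]
--             i = max(0, i - 1)
--         else:
--             i = i + 1
--     return s
-- ===== SOURCE B (Python) =====
-- def claen(s):
--     st = []
--     for c in s:
--         if c == 'i' and st and st[-1] == 'm':
--             st.pop()
--         else:
--             st.append(c)
--     return ''.join(st)
-- ===== Notes on version B (the rewrite author's own statement) =====
-- stated objective: faster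
-- what changed: Replaced the quadratic delete-and-backtrack loop (repeated string slicing after each 'mi' removal) with a single-pass stack: push each char, pop the 'm' when an 'i' arrives on top.
import Mathlib
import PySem

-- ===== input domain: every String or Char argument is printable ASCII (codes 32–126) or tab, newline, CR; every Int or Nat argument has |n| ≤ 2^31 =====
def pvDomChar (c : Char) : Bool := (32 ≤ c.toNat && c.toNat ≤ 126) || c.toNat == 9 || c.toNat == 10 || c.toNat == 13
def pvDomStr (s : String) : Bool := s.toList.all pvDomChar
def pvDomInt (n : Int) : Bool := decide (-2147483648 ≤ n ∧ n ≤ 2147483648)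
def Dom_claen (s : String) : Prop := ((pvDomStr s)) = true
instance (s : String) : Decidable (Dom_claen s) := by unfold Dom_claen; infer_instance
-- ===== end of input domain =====

-- B replaces A's quadratic delete-and-backtrack slicing loop with a one-pass stack (faster).

-- ===== PORT A =====
-- The while loop of A: state (s, i); s[:i] + s[i+2:] is take i ++ drop (i+2)
-- (exact: both slice bounds are nonnegative), max(0, i-1) is Nat subtraction i-1,
-- and 'i < len(s) - 1' over Python ints is 'i + 1 < len s' since i ≥ 0.
def claenLoopA (s : List Char) (i : Nat) : List Char :=
  if _h : i + 1 < s.length then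
    if s[i]? = some 'm' ∧ s[i+1]? = some 'i' then
      claenLoopA (s.take i ++ s.drop (i+2)) (i-1)
    else
      claenLoopA s (i+1)
  else s
termination_by 2 * s.length - i
decreasing_by
  · simp only [List.length_append, List.length_take, List.length_drop]; omega
  · omega

def claen (s : String) : String := String.mk (claenLoopA s.toList 0)

-- ===== PORT B =====
-- One step of B's stack loop (stack kept head-first; ''.join is the final reverse).
def stepB (st : List Char) (c : Char) : List Char :=
  if c = 'i' ∧ st.head? = some 'm' then st.tail else c :: st

def claen_alt (s : String) : String := String.mk ((s.toList.foldl stepB []).reverse)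

-- ===== PRECONDITION & SPEC =====
def Spec_claen (s : String) (out : String) : Prop := out = claen_alt s
instance (s : String) (out : String) : Decidable (Spec_claen s out) := by unfold Spec_claen; infer_instance

-- ===== CLAIM (what is proved, stated in full; the proofs are below) =====
def Claim_equal_claen : Prop := ∀ (s : String), Dom_claen s → Spec_claen s (claen s)

-- ===== LEMMAS AND PROOFS =====

-- "no 'mi' adjacency" predicate
def NoMI (l : List Char) : Prop := ∀ j : Nat, ¬ (l[j]? = some 'm' ∧ l[j+1]? = some 'i')

lemma nomi_short (l : List Char) (h : l.length ≤ 1) : NoMI l := by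
  intro j hj
  have h2 := hj.2
  rw [List.getElem?_eq_none (by omega)] at h2
  simp at h2

lemma nomi_take (l : List Char) (k : Nat) (h : NoMI l) : NoMI (l.take k) := by
  intro j hj
  rcases hj with ⟨h1, h2⟩
  rw [List.getElem?_take] at h1 h2
  split at h1
  · split at h2
    · exact h j ⟨h1, h2⟩
    · simp at h2
  · simp at h1

-- removing one 'mi' pair anywhere does not change B's fold
lemma foldl_remove_mi (u v : List Char) (st : List Char) :
    List.foldl stepB st (u ++ 'm' :: 'i' :: v) = List.foldl stepB st (u ++ v) := by
  simp only [List.foldl_append, List.foldl_cons]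
  have h1 : stepB (List.foldl stepB st u) 'm' = 'm' :: List.foldl stepB st u := by
    simp [stepB]
  rw [h1]
  simp [stepB]

-- on an already-reduced list the stack loop just reverses it
lemma foldl_nomi : ∀ (p q : List Char), NoMI (q ++ p) →
    List.foldl stepB q.reverse p = (q ++ p).reverse := by
  intro p
  induction p with
  | nil => intro q _; simp
  | cons c p' ih =>
    intro q h
    have hstep : stepB q.reverse c = c :: q.reverse := by
      unfold stepB
      split
      · rename_i hc
        exfalso
        rcases hc with ⟨hci, hm⟩
        rw [List.head?_reverse] at hm
        -- q ends with 'm' and next char is 'i': contradicts NoMI at q.length - 1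
        have hq : q ≠ [] := by rintro rfl; simp at hm
        have hlen : 1 ≤ q.length := by
          cases q with | nil => exact absurd rfl hq | cons a t => simp
        apply h (q.length - 1)
        constructor
        · rw [List.getElem?_append_left (by omega)]
          rw [← List.getLast?_eq_getElem?]; exact hm
        · have : q.length - 1 + 1 = q.length := by omega
          rw [this]
          rw [List.getElem?_append_right (by omega)]
          simp [hci]
      · rfl
    rw [List.foldl_cons, hstep]
    have : (c :: q.reverse) = (q ++ [c]).reverse := by simp
    rw [this, ih (q ++ [c]) (by simpa using h)]
    simp

lemma nomi_extend (l : List Char) (i : Nat)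
    (h : NoMI (l.take (i+1)))
    (hni : ¬ (l[i]? = some 'm' ∧ l[i+1]? = some 'i')) :
    NoMI (l.take (i+2)) := by
  intro j hj
  rcases hj with ⟨h1, h2⟩
  rw [List.getElem?_take] at h1 h2
  split at h1
  · split at h2
    · rename_i hj1 hj2
      by_cases hij : j = i
      · subst hij; exact hni ⟨h1, h2⟩
      · apply h j
        constructor
        · rw [List.getElem?_take]; split
          · exact h1
          · omega
        · rw [List.getElem?_take]; split
          · exact h2
          · omega
    · simp at h2
  · simp at h1

-- the main bridge: from any state whose scanned prefix is reduced, A's loop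
-- computes exactly the reverse of B's stack over the whole list
lemma loop_eq (s : List Char) (i : Nat) (h : NoMI (s.take (i+1))) :
    claenLoopA s i = (List.foldl stepB [] s).reverse := by
  induction s, i using claenLoopA.induct with
  | case1 s i hlt hmi ih =>
    rw [claenLoopA]
    rw [dif_pos hlt, if_pos hmi]
    -- decomposition: s = take i s ++ 'm' :: 'i' :: drop (i+2) s
    have hi : i < s.length := by omega
    have hi1 : i + 1 < s.length := hlt
    have hsm : s[i] = 'm' := by
      have := hmi.1; rwa [List.getElem?_eq_getElem hi, Option.some_inj] at this
    have hsi : s[i+1] = 'i' := by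
      have := hmi.2; rwa [List.getElem?_eq_getElem hi1, Option.some_inj] at this
    have hdec : s = s.take i ++ 'm' :: 'i' :: s.drop (i+2) := by
      conv_lhs => rw [← List.take_append_drop i s]
      congr 1
      rw [List.drop_eq_getElem_cons hi, hsm]
      congr 1
      rw [List.drop_eq_getElem_cons hi1, hsi]
    -- NoMI for the new prefix
    have hpre : NoMI ((s.take i ++ s.drop (i+2)).take (i-1+1)) := by
      by_cases h0 : i = 0
      · subst h0
        exact nomi_short _ (by simp only [List.length_take]; omega)
      · have : i - 1 + 1 = i := by omega
        rw [this]
        have htk : (s.take i ++ s.drop (i+2)).take i = s.take i := by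
          rw [List.take_append_of_le_length (by simp only [List.length_take]; omega)]
          simp [List.take_take]
        rw [htk]
        have hq : s.take i = (s.take (i+1)).take i := by
          simp only [List.take_take]
          congr 1
          omega
        rw [hq]
        exact nomi_take _ _ h
    rw [ih hpre]
    have hf : List.foldl stepB [] s = List.foldl stepB [] (s.take i ++ s.drop (i+2)) := by
      conv_lhs => rw [hdec]
      exact foldl_remove_mi _ _ _
    rw [hf]
  | case2 s i hlt hmi ih =>
    rw [claenLoopA]
    rw [dif_pos hlt, if_neg hmi]
    exact ih (by
      have := nomi_extend s i h hmi
      rwa [show i + 2 = i + 1 + 1 by omega] at this)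
  | case3 s i hlt =>
    rw [claenLoopA, dif_neg hlt]
    have hs : s.take (i+1) = s := List.take_of_length_le (by omega)
    rw [hs] at h
    have := foldl_nomi s [] (by simpa using h)
    simp only [List.reverse_nil, List.nil_append] at this
    rw [this, List.reverse_reverse]

-- ===== VERDICT (by name: the statement is the Claim_ definition above) =====
theorem claen_spec : Claim_equal_claen := by
  intro s _
  unfold Spec_claen claen claen_alt
  congr 1
  exact loop_eq s.toList 0 (nomi_short _ (by simp only [List.length_take]; omega))
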